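-- pv_equiv track=rewrite | github.com/Bimi1804/Decl.-ASAG | python_files/classes.py | __alternate_succession_check
-- ===== SOURCE A (Python) =====
-- def __alternate_succession_check(act_a,act_b,processed_answer):
--     """
--     Checks if the answer fulfills Alternate Succession[A,B]
--
--     Parameters
--     ----------
--     act_a : str
--         The actual text (word) of activity A
--     act_b : str
--         The actual text (word) of activity B
--     processed_answer : str[0..*]
--         the list of processed words of the answer
--
--     Returns
--     -------
--     True -> If the answer fulfills the constraint
--     False -> If the answer does not fulfill the constraint
--     """
--     # True if A and B are not in the answer:
--     if act_a not in processed_answer and act_b not in processed_answer: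
--         return True
--     # False if only A or only B is in the answer:
--     if act_a not in processed_answer or act_b not in processed_answer:
--         return False
--     checking = processed_answer
--     # Check as long as A or B are in the remaining answer:
--     while act_a in checking or act_b in checking:
--         # False if one of them is not in the reamaining answer:
--         if act_a not in checking:
--             return False
--         if act_b not in checking:
--             return False
--         marker_a = checking.index(act_a)                # index of first A
--         marker_b = checking.index(act_b)                # index of first B
--         # False if A follows B:
--         if marker_a > marker_b:
--             return False
--         # False if an A is between first A and first B
--         if act_a in checking[marker_a+1:marker_b]:
--             return False
--         checking.pop(marker_a)                          # remove first A
--         checking.pop(checking.index(act_b))             # remove first B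
--     return True
-- ===== SOURCE B (Python) =====
-- def __alternate_succession_check(act_a, act_b, processed_answer):
--     # Single left-to-right pass: track whether an A is currently "open"
--     # (seen and not yet closed by a B). Does not mutate processed_answer
--     # (A pops from it in place); equivalence is about the return value.
--     open_a = False
--     for word in processed_answer:
--         if word == act_a:
--             if open_a:
--                 return False
--             open_a = True
--         elif word == act_b:
--             if not open_a:
--                 return False
--             open_a = False
--     return not open_a
-- ===== Notes on version B (the rewrite author's own statement) =====
-- stated objective: simpler
-- what changed: Replaced the repeated membership-scan/index/pop while-loop (and its two up-front membership passes) by one left-to-right pass with a single boolean alternation state; B also does not mutate processed_answer, while A pops matched pairs from it in place.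
-- outside the precondition, e.g. on __alternate_succession_check('x', 'x', ['x', 'x']): A returns True, B returns False
-- crash fix: When act_a == act_b and that word occurs an odd number of times, A raises ValueError (it pops the lone occurrence and then calls .index on it again); B returns False there. — e.g. on __alternate_succession_check("x", "x", ["x"]): A raises ValueError, B returns false
import Mathlib
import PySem

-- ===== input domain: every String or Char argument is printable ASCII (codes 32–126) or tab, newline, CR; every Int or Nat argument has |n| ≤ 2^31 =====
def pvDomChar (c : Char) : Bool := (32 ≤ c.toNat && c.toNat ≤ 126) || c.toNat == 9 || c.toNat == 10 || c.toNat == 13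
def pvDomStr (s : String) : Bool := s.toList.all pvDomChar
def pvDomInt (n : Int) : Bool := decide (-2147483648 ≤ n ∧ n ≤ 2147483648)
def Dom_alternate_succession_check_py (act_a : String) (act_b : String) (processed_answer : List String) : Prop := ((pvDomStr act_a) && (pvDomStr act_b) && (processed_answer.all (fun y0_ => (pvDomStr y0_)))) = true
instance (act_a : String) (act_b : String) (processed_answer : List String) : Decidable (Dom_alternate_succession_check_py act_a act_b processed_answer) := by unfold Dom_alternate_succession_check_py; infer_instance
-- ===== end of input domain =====

-- B replaces A's repeated scan/index/pop while-loop by one left-to-right pass with a single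
-- boolean alternation state; A pops matched pairs from processed_answer in place, B does not
-- mutate it — the equivalence proved here is about the return value only.


-- ===== PORT A =====
-- helper for the termination argument of A's while loop
theorem popD_le {α : Type} (xs : List α) (i : Int) :
    (((PySem.List.pop? xs i).map Prod.snd).getD []).length ≤ xs.length - 1 := by
  cases h : PySem.List.pop? xs i with
  | none => simp
  | some r =>
    have := PySem.List.length_of_pop?_eq_some xs h
    simp
    omega

-- the 'while act_a in checking or act_b in checking' loop of A, line for line.
-- Python's .index/.pop calls here cannot raise inside Pre_ (the element was just tested
-- present, the index just computed), so the total .getD forms are exact there; the second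
-- .index raises ValueError exactly when act_a = act_b occurs an odd number of times,
-- which lies outside Pre_.
def ascLoop (act_a act_b : String) (checking : List String) : Bool :=
  if h : act_a ∈ checking ∨ act_b ∈ checking then
    if act_a ∉ checking then false
    else if act_b ∉ checking then false
    else
      let marker_a := (PySem.List.index? checking act_a).getD 0
      let marker_b := (PySem.List.index? checking act_b).getD 0
      if marker_b < marker_a then false
      else if act_a ∈ PySem.List.slice checking (some ((marker_a : Int) + 1)) (some (marker_b : Int)) then false
      else
        let c1 := ((PySem.List.pop? checking (marker_a : Int)).map Prod.snd).getD []
        let c2 := ((PySem.List.pop? c1 (((PySem.List.index? c1 act_b).getD 0 : Nat) : Int)).map Prod.snd).getD []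
        ascLoop act_a act_b c2
  else true
termination_by checking.length
decreasing_by
  have hne : checking ≠ [] := by
    rcases h with h | h
    · exact List.ne_nil_of_mem h
    · exact List.ne_nil_of_mem h
  have hpos : 0 < checking.length := List.length_pos_of_ne_nil hne
  have h1 := popD_le checking ((marker_a : Nat) : Int)
  have h2 := popD_le c1 (((PySem.List.index? c1 act_b).getD 0 : Nat) : Int)
  simp only [marker_a, c1] at h1 h2 ⊢
  omega

def alternate_succession_check_py (act_a : String) (act_b : String) (processed_answer : List String) : Bool :=
  if act_a ∉ processed_answer ∧ act_b ∉ processed_answer then true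
  else if act_a ∉ processed_answer ∨ act_b ∉ processed_answer then false
  else ascLoop act_a act_b processed_answer

-- ===== PORT B =====
-- one pass, state open_a = "an A has been seen and not yet closed by a B"
def ascGo (act_a act_b : String) (open_a : Bool) : List String → Bool
  | [] => !open_a
  | word :: rest =>
    if word == act_a then
      (if open_a then false else ascGo act_a act_b true rest)
    else if word == act_b then
      (if !open_a then false else ascGo act_a act_b false rest)
    else ascGo act_a act_b open_a rest

def alternate_succession_check_py_alt (act_a : String) (act_b : String) (processed_answer : List String) : Bool :=
  ascGo act_a act_b false processed_answer

-- ===== PRECONDITION & SPEC =====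
-- Pre_ excludes only the degenerate calls with act_a = act_b and that word present in the
-- answer: there A raises ValueError when the word occurs an odd number of times, and for even
-- counts returns an accidental True (pairing the word with itself), while the constraint with
-- A = B is one nobody would specify; B naturally returns False whenever the word is present.
def Pre_alternate_succession_check_py (act_a : String) (act_b : String) (processed_answer : List String) : Prop :=
  act_a ≠ act_b ∨ act_a ∉ processed_answer
instance (act_a : String) (act_b : String) (processed_answer : List String) : Decidable (Pre_alternate_succession_check_py act_a act_b processed_answer) := by unfold Pre_alternate_succession_check_py; infer_instance
def pvWitness_alternate_succession_check_py : String × String × List String := ("go", "stop", ["go", "now", "stop", "go", "stop"])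

-- A raises ValueError when act_a = act_b and that word occurs an odd number of times in
-- processed_answer; B returns False there.
def Raises_alternate_succession_check_py (act_a : String) (act_b : String) (processed_answer : List String) : Prop :=
  act_a = act_b ∧ processed_answer.count act_a % 2 = 1
instance (act_a : String) (act_b : String) (processed_answer : List String) : Decidable (Raises_alternate_succession_check_py act_a act_b processed_answer) := by unfold Raises_alternate_succession_check_py; infer_instance
def pvRaiseWitness_alternate_succession_check_py : String × String × List String := ("x", "x", ["x"])
def pvRaiseWitnessOut_alternate_succession_check_py : Bool := false

def Spec_alternate_succession_check_py (act_a : String) (act_b : String) (processed_answer : List String) (out : Bool) : Prop := out = alternate_succession_check_py_alt act_a act_b processed_answer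
instance (act_a : String) (act_b : String) (processed_answer : List String) (out : Bool) : Decidable (Spec_alternate_succession_check_py act_a act_b processed_answer out) := by unfold Spec_alternate_succession_check_py; infer_instance

-- ===== CLAIM (what is proved, stated in full; the proofs are below) =====
def Claim_equal_alternate_succession_check_py : Prop := ∀ (act_a : String) (act_b : String) (processed_answer : List String), Dom_alternate_succession_check_py act_a act_b processed_answer → Pre_alternate_succession_check_py act_a act_b processed_answer → Spec_alternate_succession_check_py act_a act_b processed_answer (alternate_succession_check_py act_a act_b processed_answer)
def Claim_raises_alternate_succession_check_py : Prop := (∀ (act_a : String) (act_b : String) (processed_answer : List String), Dom_alternate_succession_check_py act_a act_b processed_answer → Raises_alternate_succession_check_py act_a act_b processed_answer → ¬ Pre_alternate_succession_check_py act_a act_b processed_answer) ∧ (Dom_alternate_succession_check_py (pvRaiseWitness_alternate_succession_check_py.1) (pvRaiseWitness_alternate_succession_check_py.2.1) (pvRaiseWitness_alternate_succession_check_py.2.2) ∧ Raises_alternate_succession_check_py (pvRaiseWitness_alternate_succession_check_py.1) (pvRaiseWitness_alternate_succession_check_py.2.1) (pvRaiseWitness_alternate_succession_check_py.2.2) ∧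 alternate_succession_check_py_alt (pvRaiseWitness_alternate_succession_check_py.1) (pvRaiseWitness_alternate_succession_check_py.2.1) (pvRaiseWitness_alternate_succession_check_py.2.2) = pvRaiseWitnessOut_alternate_succession_check_py)

-- ===== LEMMAS AND PROOFS =====

-- the alternation pattern check on the subsequence of act_a/act_b occurrences
def pat (act_a act_b : String) : Bool → List String → Bool
  | s, [] => !s
  | false, x :: r => if x == act_a then pat act_a act_b true r else false
  | true, x :: r => if x == act_a then false else pat act_a act_b false r

theorem index?_append_of_not_mem (u t : List String) (b : String) (h : b ∉ u) :
    PySem.List.index? (u ++ t) b = (PySem.List.index? t b).map (· + u.length) := by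
  induction u with
  | nil => simp
  | cons x xs ih =>
    simp at h
    rw [List.cons_append, PySem.List.index?_cons_of_ne _ (Ne.symm h.1), ih h.2]
    cases PySem.List.index? t b
    · simp
    · simp; omega

theorem eraseIdx_append_self (u t : List String) (x : String) :
    (u ++ x :: t).eraseIdx u.length = u ++ t := by
  induction u with
  | nil => simp
  | cons y ys ih => simp [ih]

theorem filter_ab_nil (a b : String) (u : List String) (ha : a ∉ u) (hb : b ∉ u) :
    u.filter (fun w => w == a || w == b) = [] := by
  rw [List.filter_eq_nil_iff]
  intro x hx
  simp only [Bool.or_eq_true, beq_iff_eq, not_or]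
  exact ⟨fun h => ha (h ▸ hx), fun h => hb (h ▸ hx)⟩

theorem ascGo_eq_pat (a b : String) (l : List String) (s : Bool) :
    ascGo a b s l = pat a b s (l.filter (fun w => w == a || w == b)) := by
  induction l generalizing s with
  | nil => cases s <;> rfl
  | cons w rest ih =>
    by_cases hwa : w = a
    · subst hwa
      cases s <;> simp [ascGo, pat, ih]
    · by_cases hwb : w = b
      · subst hwb
        cases s <;> simp [ascGo, pat, hwa, ih]
      · simp [ascGo, hwa, hwb, ih]

theorem pat_true_all_a (a b : String) (t : List String) (h : ∀ x ∈ t, x = a) :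
    pat a b true t = false := by
  cases t with
  | nil => rfl
  | cons x r => simp [pat, h x (by simp)]

-- main lemma: on distinct activities, A's scan-and-pop loop checks exactly the
-- alternation pattern of the act_a/act_b occurrence subsequence
theorem ascLoop_eq_pat (a b : String) (hab : a ≠ b) (l : List String) :
    ascLoop a b l = pat a b false (l.filter (fun w => w == a || w == b)) := by
  by_cases hal : a ∈ l
  · by_cases hbl : b ∈ l
    · obtain ⟨ma, hma⟩ := Option.isSome_iff_exists.mp ((PySem.List.index?_isSome_iff l a).mpr hal)
      obtain ⟨mb, hmb⟩ := Option.isSome_iff_exists.mp ((PySem.List.index?_isSome_iff l b).mpr hbl)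
      obtain ⟨hmaLt, hga, hfa⟩ := PySem.List.getElem_of_index?_eq_some hma
      obtain ⟨hmbLt, hgb, hfb⟩ := PySem.List.getElem_of_index?_eq_some hmb
      have hne : ma ≠ mb := fun h => hab (by rw [← hga, ← hgb]; congr 1)
      rcases Nat.lt_or_lt_of_ne hne with hlt | hgt
      · -- ma < mb : decompose l = u ++ a :: v ++ b :: w
        obtain ⟨u, s, hlu, hlenu, hau⟩ := (PySem.List.index?_eq_some_iff l a ma).mp hma
        subst hlu
        have hbu : b ∉ u := by
          intro hmem
          obtain ⟨j, hj, hju⟩ := List.mem_iff_getElem.mp hmem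
          exact hfb j (by omega) (by rw [List.getElem_append_left hj]; exact hju)
        have hmb2 := hmb
        rw [index?_append_of_not_mem u _ b hbu, PySem.List.index?_cons_of_ne _ hab] at hmb2
        cases h2 : PySem.List.index? s b with
        | none => rw [h2] at hmb2; simp at hmb2
        | some k =>
          rw [h2] at hmb2
          simp only [Option.map_some] at hmb2
          have hkmb : k + 1 + u.length = mb := by
            simpa using congrArg (fun o => o.getD 0) hmb2
          obtain ⟨v, w, hsv, hlenv, hbv⟩ := (PySem.List.index?_eq_some_iff s b k).mp h2
          subst hsv
          have hslice : PySem.List.slice (u ++ a :: (v ++ b :: w)) (some ((ma : Int) + 1)) (some (mb : Int)) = v := by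
            have hcast : ((ma : Int) + 1) = ((ma + 1 : Nat) : Int) := by push_cast; ring
            rw [hcast, PySem.List.slice_natCast]
            have hd : (u ++ a :: (v ++ b :: w)).drop (ma + 1) = v ++ b :: w := by
              have hre : u ++ a :: (v ++ b :: w) = (u ++ [a]) ++ (v ++ b :: w) := by simp
              rw [hre, List.drop_left' (by simp [hlenu])]
            rw [hd, List.take_left' (by omega)]
          rw [ascLoop]
          rw [dif_pos (Or.inl hal), if_neg (not_not_intro hal), if_neg (not_not_intro hbl)]
          simp only [hma, hmb, Option.getD_some]
          simp only [if_neg (by omega : ¬ mb < ma)]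
          by_cases hslc : a ∈ PySem.List.slice (u ++ a :: (v ++ b :: w)) (some ((ma : Int) + 1)) (some (mb : Int))
          · -- an A strictly between the first A and the first B: both sides false
            rw [if_pos hslc]
            rw [hslice] at hslc
            rw [List.filter_append, filter_ab_nil a b u hau hbu, List.nil_append,
              List.filter_cons_of_pos (by simp)]
            cases hfv : v.filter (fun w => w == a || w == b) with
            | nil =>
              exfalso
              have hmm : a ∈ v.filter (fun w => w == a || w == b) := List.mem_filter.mpr ⟨hslc, by simp⟩
              rw [hfv] at hmm; exact (List.not_mem_nil) hmm
            | cons x r =>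
              have hx := List.mem_filter.mp (hfv ▸ List.mem_cons_self (l := r))
              have hxa : x = a := by
                rcases (by simpa using hx.2) with h | h
                · exact h
                · exact absurd (h ▸ hx.1) hbv
              simp [List.filter_append, hfv, hxa, pat]
          · -- the popping step: recurse on u ++ v ++ w
            rw [if_neg hslc]
            rw [hslice] at hslc
            have hpop1 : PySem.List.pop? (u ++ a :: (v ++ b :: w)) ((ma : Nat) : Int) =
                some ((u ++ a :: (v ++ b :: w))[ma], (u ++ a :: (v ++ b :: w)).eraseIdx ma) :=
              PySem.List.pop?_natCast _ ma hmaLt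
            have herase1 : (u ++ a :: (v ++ b :: w)).eraseIdx ma = u ++ (v ++ b :: w) := by
              rw [← hlenu]; exact eraseIdx_append_self u (v ++ b :: w) a
            have hidx2 : PySem.List.index? (u ++ (v ++ b :: w)) b = some (u.length + v.length) := by
              rw [← List.append_assoc, index?_append_of_not_mem _ _ _ (by simp [hbu, hbv]),
                PySem.List.index?_cons_self]
              simp
            have hlt2 : u.length + v.length < (u ++ (v ++ b :: w)).length := by simp
            have hpop2 : PySem.List.pop? (u ++ (v ++ b :: w)) ((u.length + v.length : Nat) : Int) =
                some ((u ++ (v ++ b :: w))[u.length + v.length],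
                      (u ++ (v ++ b :: w)).eraseIdx (u.length + v.length)) :=
              PySem.List.pop?_natCast _ _ hlt2
            have herase2 : (u ++ (v ++ b :: w)).eraseIdx (u.length + v.length) = (u ++ v) ++ w := by
              rw [← List.append_assoc]
              have hl2 : u.length + v.length = (u ++ v).length := by simp
              rw [hl2]; exact eraseIdx_append_self (u ++ v) w b
            simp only [hpop1, Option.map_some, Option.getD_some, herase1, hidx2, hpop2, herase2]
            rw [ascLoop_eq_pat a b hab ((u ++ v) ++ w)]
            simp [List.filter_append, filter_ab_nil a b u hau hbu,
              filter_ab_nil a b v hslc hbv, pat, Ne.symm hab]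
      · -- mb < ma : the first occurrence is a B, both sides false
        obtain ⟨u, s, hlu, hlenu, hbu⟩ := (PySem.List.index?_eq_some_iff l b mb).mp hmb
        subst hlu
        have hau : a ∉ u := by
          intro hmem
          obtain ⟨j, hj, hju⟩ := List.mem_iff_getElem.mp hmem
          exact hfa j (by omega) (by rw [List.getElem_append_left hj]; exact hju)
        rw [ascLoop]
        rw [dif_pos (Or.inl hal), if_neg (not_not_intro hal), if_neg (not_not_intro hbl)]
        simp only [hma, hmb, Option.getD_some]
        simp only [if_pos hgt]
        simp [List.filter_append, filter_ab_nil a b u hau hbu, pat, Ne.symm hab]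
    · -- a ∈ l, b ∉ l : only A's occur, both sides false
      rw [ascLoop]
      rw [dif_pos (Or.inl hal), if_neg (not_not_intro hal), if_pos hbl]
      cases hf : l.filter (fun w => w == a || w == b) with
      | nil =>
        exfalso
        have hmm : a ∈ l.filter (fun w => w == a || w == b) := List.mem_filter.mpr ⟨hal, by simp⟩
        rw [hf] at hmm; exact (List.not_mem_nil) hmm
      | cons x r =>
        have hall : ∀ y ∈ l.filter (fun w => w == a || w == b), y = a := by
          intro y hy
          have hy' := List.mem_filter.mp hy
          rcases (by simpa using hy'.2) with h | h
          · exact h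
          · exact absurd (h ▸ hy'.1) hbl
        have hxa : x = a := hall x (hf ▸ List.mem_cons_self (l := r))
        rw [hxa]
        simp only [pat, BEq.rfl, if_true]
        exact (pat_true_all_a a b r (fun y hy => hall y (hf ▸ List.mem_cons_of_mem x hy))).symm
  · by_cases hbl : b ∈ l
    · -- b ∈ l, a ∉ l : the first occurrence is not a, both sides false
      rw [ascLoop]
      rw [dif_pos (Or.inr hbl), if_pos hal]
      cases hf : l.filter (fun w => w == a || w == b) with
      | nil =>
        exfalso
        have hmm : b ∈ l.filter (fun w => w == a || w == b) := List.mem_filter.mpr ⟨hbl, by simp⟩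
        rw [hf] at hmm; exact (List.not_mem_nil) hmm
      | cons x r =>
        have hx := List.mem_filter.mp (hf ▸ List.mem_cons_self (l := r))
        have hxb : x ≠ a := fun h => hal (h ▸ hx.1)
        simp [pat, hxb]
    · -- neither occurs : both sides true
      rw [ascLoop]
      rw [dif_neg (by simp [hal, hbl]), filter_ab_nil a b l hal hbl]
      rfl
termination_by l.length
decreasing_by
  simp_all [List.length_append]

-- ===== VERDICT (by name: the statement is the Claim_ definition above) =====
theorem alternate_succession_check_py_spec : Claim_equal_alternate_succession_check_py := by
  intro a b l _ hpre
  unfold Spec_alternate_succession_check_py alternate_succession_check_py alternate_succession_check_py_alt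
  rw [ascGo_eq_pat]
  rcases hpre with hab | hanl
  · by_cases hal : a ∈ l
    · by_cases hbl : b ∈ l
      · rw [if_neg (by tauto), if_neg (by tauto)]
        exact ascLoop_eq_pat a b hab l
      · rw [if_neg (by tauto), if_pos (by tauto)]
        cases hf : l.filter (fun w => w == a || w == b) with
        | nil =>
          exfalso
          have : a ∈ l.filter (fun w => w == a || w == b) := List.mem_filter.mpr ⟨hal, by simp⟩
          rw [hf] at this; exact (List.not_mem_nil) this
        | cons x r =>
          have hall : ∀ y ∈ l.filter (fun w => w == a || w == b), y = a := by
            intro y hy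
            have hy' := List.mem_filter.mp hy
            rcases (by simpa using hy'.2) with h | h
            · exact h
            · exact absurd (h ▸ hy'.1) hbl
          have hxa : x = a := hall x (hf ▸ List.mem_cons_self (l := r))
          rw [hxa]
          simp only [pat, BEq.rfl, if_true]
          exact (pat_true_all_a a b r (fun y hy => hall y (hf ▸ List.mem_cons_of_mem x hy))).symm
    · by_cases hbl : b ∈ l
      · rw [if_neg (by tauto), if_pos (by tauto)]
        cases hf : l.filter (fun w => w == a || w == b) with
        | nil =>
          exfalso
          have : b ∈ l.filter (fun w => w == a || w == b) := List.mem_filter.mpr ⟨hbl, by simp⟩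
          rw [hf] at this; exact (List.not_mem_nil) this
        | cons x r =>
          have hx := List.mem_filter.mp (hf ▸ List.mem_cons_self (l := r))
          have hxb : x ≠ a := fun h => hal (h ▸ hx.1)
          simp [pat, hxb]
      · rw [if_pos ⟨hal, hbl⟩, filter_ab_nil a b l hal hbl]
        rfl
  · by_cases hbl : b ∈ l
    · rw [if_neg (by tauto), if_pos (by tauto)]
      cases hf : l.filter (fun w => w == a || w == b) with
      | nil =>
        exfalso
        have : b ∈ l.filter (fun w => w == a || w == b) := List.mem_filter.mpr ⟨hbl, by simp⟩
        rw [hf] at this; exact (List.not_mem_nil) this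
      | cons x r =>
        have hx := List.mem_filter.mp (hf ▸ List.mem_cons_self (l := r))
        have hxb : x ≠ a := fun h => hanl (h ▸ hx.1)
        simp [pat, hxb]
    · rw [if_pos ⟨hanl, hbl⟩, filter_ab_nil a b l hanl hbl]
      rfl
@[simp] theorem alternate_succession_check_py_raises : Claim_raises_alternate_succession_check_py := by
  unfold Claim_raises_alternate_succession_check_py
  refine ⟨?_, by decide⟩
  intro a b l _ hr hp
  rcases hr with ⟨rfl, hc⟩
  rcases hp with h | h
  · exact h rfl
  · simp [List.count_eq_zero_of_not_mem h] at hc
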